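-- pv_equiv track=rewrite | github.com/mx262cal726/BIMM181 | suffix_array.py | get_btw
-- ===== SOURCE A (Python) =====
-- def get_btw(text):
--
--     itext = lambda x: text[-1]+text[:-1]
--     m = []
--     for i in range(0, len(text)):
--         m.append(text)
--         text = itext(text)
--     m.sort()
--     return m
-- ===== SOURCE B (Python) =====
-- def get_btw(text):
--     n = len(text)
--     doubled = text + text
--     return sorted(doubled[i:i + n] for i in range(n))
-- ===== Notes on version B (the rewrite author's own statement) =====
-- stated objective: simpler
-- what changed: B slices the doubled string text+text to produce all n rotations directly, instead of A's loop that repeatedly re-builds the string by moving its last character to the front.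
import Mathlib
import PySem

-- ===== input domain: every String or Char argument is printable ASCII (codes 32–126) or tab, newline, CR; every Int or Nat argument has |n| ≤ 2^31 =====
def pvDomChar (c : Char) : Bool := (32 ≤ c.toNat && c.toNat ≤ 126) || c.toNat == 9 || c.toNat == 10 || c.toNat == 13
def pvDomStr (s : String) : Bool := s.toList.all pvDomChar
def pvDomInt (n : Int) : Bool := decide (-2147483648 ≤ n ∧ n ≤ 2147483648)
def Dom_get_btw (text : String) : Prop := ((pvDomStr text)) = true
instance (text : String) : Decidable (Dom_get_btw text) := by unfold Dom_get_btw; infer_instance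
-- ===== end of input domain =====

-- B builds all rotations by slicing the doubled string instead of iterating a
-- right-rotation step n times; objective: simpler.

-- ===== PORT A =====
-- itext = lambda x: text[-1] + text[:-1]  (x unused; reads the current text)
def pvItextA (t : List Char) : List Char :=
  match PySem.List.pyGet? t (-1) with
  | some c => c :: PySem.List.slice t none (some (-1))
  | none => []   -- dead branch: the loop body only runs when text is nonempty

-- for i in range(0, len(text)): m.append(text); text = itext(text)
def pvLoopA : Nat → List Char → List (List Char) → List (List Char)
  | 0, _, m => m
  | k+1, t, m => pvLoopA k (pvItextA t) (m ++ [t])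

def get_btw (text : String) : List String :=
  PySem.List.sorted
    ((pvLoopA text.toList.length text.toList []).map String.ofList) (fun x => x) false

-- ===== PORT B =====
-- n = len(text); doubled = text + text; return sorted(doubled[i:i+n] for i in range(n))
def get_btw_alt (text : String) : List String :=
  let cs := text.toList
  let n : Nat := cs.length
  let d := cs ++ cs
  PySem.List.sorted
    ((PySem.List.pyRange 0 (n : Int)).map
      (fun i => String.ofList (PySem.List.slice d (some i) (some (i + (n : Int))))))
    (fun x => x) false

-- ===== PRECONDITION & SPEC =====
def Spec_get_btw (text : String) (out : List String) : Prop := out = get_btw_alt text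
instance (text : String) (out : List String) : Decidable (Spec_get_btw text out) := by unfold Spec_get_btw; infer_instance

-- ===== CLAIM (what is proved, stated in full; the proofs are below) =====
def Claim_equal_get_btw : Prop := ∀ (text : String), Dom_get_btw text → Spec_get_btw text (get_btw text)

-- ===== LEMMAS AND PROOFS =====

-- left rotation by j: both programs' intermediate values are these
def pvRotL (cs : List Char) (j : Nat) : List Char := cs.drop j ++ cs.take j

lemma pvItextA_rotL (cs : List Char) (j : Nat) (h1 : 1 ≤ j) (h2 : j ≤ cs.length) :
    pvItextA (pvRotL cs j) = pvRotL cs (j - 1) := by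
  obtain ⟨k, rfl⟩ : ∃ k, j = k + 1 := ⟨j - 1, by omega⟩
  have hj : k < cs.length := by omega
  have ht : cs.take (k+1) = cs.take k ++ [cs[k]] := List.take_succ_eq_append_getElem hj
  have hd : cs.drop k = cs[k] :: cs.drop (k+1) := List.drop_eq_getElem_cons hj
  unfold pvItextA pvRotL
  rw [ht, ← List.append_assoc]
  simp only [PySem.List.pyGet?_neg_one, PySem.List.slice_to_neg_one,
    List.getLast?_concat, List.dropLast_concat]
  simp only [Nat.add_sub_cancel]; rw [hd, List.cons_append]

lemma pvItextA_self (cs : List Char) (h : cs ≠ []) :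
    pvItextA cs = pvRotL cs (cs.length - 1) := by
  have h1 : 1 ≤ cs.length := List.length_pos_iff.mpr h
  have := pvItextA_rotL cs cs.length h1 le_rfl
  simpa [pvRotL] using this

lemma pvLoopA_spec (cs : List Char) :
    ∀ (k j : Nat) (m : List (List Char)), j < cs.length → k ≤ j + 1 →
    pvLoopA k (pvRotL cs j) m = m ++ (List.range k).map (fun i => pvRotL cs (j - i)) := by
  intro k
  induction k with
  | zero => intro j m _ _; simp [pvLoopA]
  | succ k ih =>
    intro j m hj hk
    rcases Nat.eq_zero_or_pos k with rfl | hkpos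
    · simp [pvLoopA]
    · have hj1 : 1 ≤ j := by omega
      rw [pvLoopA, pvItextA_rotL cs j hj1 (by omega),
        ih (j-1) (m ++ [pvRotL cs j]) (by omega) (by omega)]
      rw [List.range_succ_eq_map]
      simp [List.map_map, Function.comp_def]
      intro a _
      congr 1
      omega

lemma pvLoopA_char (cs : List Char) (h : cs ≠ []) :
    pvLoopA cs.length cs [] =
      cs :: (List.range (cs.length - 1)).map (fun i => pvRotL cs (cs.length - 1 - i)) := by
  obtain ⟨n, hn⟩ : ∃ n, cs.length = n + 1 := ⟨cs.length - 1, by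
    have := List.length_pos_iff.mpr h; omega⟩
  rw [hn, pvLoopA, pvItextA_self cs h]
  rw [pvLoopA_spec cs n (cs.length - 1) ([] ++ [cs]) (by omega) (by omega)]
  simp [hn]

lemma pvSliceB (cs : List Char) (i : Nat) (hi : i ≤ cs.length) :
    PySem.List.slice (cs ++ cs) (some (i : Int)) (some ((i : Int) + (cs.length : Int))) =
      pvRotL cs i := by
  rw [PySem.List.slice_natCast_add, List.drop_append_of_le_length hi, List.take_append,
    List.take_of_length_le (by simp), List.length_drop]
  have : cs.length - (cs.length - i) = i := by omega
  rw [this, pvRotL]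

lemma pvRangeRev (m : Nat) :
    (List.range m).map (fun i => m - i) = ((List.range m).map (fun i => i + 1)).reverse := by
  apply List.ext_getElem (by simp)
  intro i h1 h2
  simp at h1 ⊢
  omega

lemma pvPerm (cs : List Char) (h : cs ≠ []) :
    (pvLoopA cs.length cs []).Perm ((List.range cs.length).map (pvRotL cs)) := by
  obtain ⟨n, hn⟩ : ∃ n, cs.length = n + 1 := ⟨cs.length - 1, by
    have := List.length_pos_iff.mpr h; omega⟩
  rw [pvLoopA_char cs h, hn, List.range_succ_eq_map]
  have h1 : (List.range (n + 1 - 1)).map (fun i => pvRotL cs (n + 1 - 1 - i)) =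
      ((List.range n).map (fun i => pvRotL cs (i + 1))).reverse := by
    simp only [Nat.add_sub_cancel]
    rw [show (fun i => pvRotL cs (n - i)) = (pvRotL cs) ∘ (fun i => n - i) from rfl,
      ← List.map_map, pvRangeRev n, ← List.map_reverse, List.map_map]
    rw [List.map_reverse]
    simp [Function.comp_def]
  rw [h1]
  simp only [List.map_cons, List.map_map]
  have h0 : pvRotL cs 0 = cs := by simp [pvRotL]
  rw [h0]
  refine List.Perm.cons _ ?_
  refine (List.reverse_perm _).trans ?_
  simp [Function.comp_def, Nat.succ_eq_add_one]

-- ===== VERDICT (by name: the statement is the Claim_ definition above) =====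
theorem get_btw_spec : Claim_equal_get_btw := by
  intro text _
  unfold Spec_get_btw get_btw get_btw_alt
  simp only []
  by_cases h : text.toList = []
  · simp [h, pvLoopA]
  · have hB : (PySem.List.pyRange 0 ((text.toList.length : Nat) : Int)).map
        (fun i => String.ofList (PySem.List.slice (text.toList ++ text.toList) (some i) (some (i + (text.toList.length : Int))))) =
        ((List.range text.toList.length).map (pvRotL text.toList)).map String.ofList := by
      rw [PySem.List.pyRange_zero_nat, List.map_map, List.map_map]
      apply List.map_congr_left
      intro k hk
      simp only [Function.comp_def]
      rw [pvSliceB text.toList k (le_of_lt (List.mem_range.mp hk))]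
    rw [hB]
    exact PySem.List.sorted_eq_sorted_of_perm _ _ _ (fun a b hab => hab)
      ((pvPerm text.toList h).map String.ofList)
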